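-- pv_equiv track=rewrite | github.com/goonerDroid/cs50 | project0/tictactoe/tictactoe.py | check_second_diag
-- ===== SOURCE A (Python) =====
-- def check_second_diag(board, player):
--     count = 0
--     for row in range(len(board)):
--         for col in range(len(board[row])):
--             if (len(board) - row - 1) == col and board[row][col] == player:
--                 count += 1
--
--     if count == 3:
--         return True
--     else:
--         return False
-- ===== SOURCE B (Python) =====
-- def check_second_diag(board, player):
--     n = len(board)
--     count = 0
--     for i, row in enumerate(board):
--         j = n - 1 - i
--         if j < len(row) and row[j] == player:
--             count += 1
--     return count == 3
-- ===== Notes on version B (the rewrite author's own statement) =====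
-- stated objective: faster
-- what changed: B walks the anti-diagonal directly in one pass over the rows (j = n-1-i with a bounds check for short rows) instead of A's nested scan of every cell filtered by an index equation.
import Mathlib
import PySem

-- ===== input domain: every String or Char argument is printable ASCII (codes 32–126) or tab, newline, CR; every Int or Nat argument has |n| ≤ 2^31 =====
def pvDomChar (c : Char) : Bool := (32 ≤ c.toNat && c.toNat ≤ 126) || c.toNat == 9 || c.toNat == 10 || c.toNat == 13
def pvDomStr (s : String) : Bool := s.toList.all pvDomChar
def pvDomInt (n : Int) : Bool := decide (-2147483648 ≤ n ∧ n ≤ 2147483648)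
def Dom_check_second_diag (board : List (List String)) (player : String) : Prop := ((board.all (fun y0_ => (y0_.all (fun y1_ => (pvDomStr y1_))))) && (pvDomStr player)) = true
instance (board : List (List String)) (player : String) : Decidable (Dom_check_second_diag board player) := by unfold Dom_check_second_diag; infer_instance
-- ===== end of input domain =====

-- B walks the anti-diagonal in one pass (with a bounds check for short rows) instead of A's full cell scan.
-- ===== PORT A =====
def check_second_diag (board : List (List String)) (player : String) : Bool :=
  let count : Int :=
    (PySem.List.pyRange 0 (board.length : Int) 1).foldl (fun count row =>
      (PySem.List.pyRange 0 ((PySem.List.pyGetD board row []).length : Int) 1).foldl (fun count col =>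
        if (board.length : Int) - row - 1 = col ∧
            PySem.List.pyGetD (PySem.List.pyGetD board row []) col "" = player
        then count + 1 else count) count) 0
  if count = 3 then true else false

-- ===== PORT B =====
def check_second_diag_alt (board : List (List String)) (player : String) : Bool :=
  let n : Int := board.length
  let count : Int :=
    (PySem.List.enumerate board 0).foldl (fun count p =>
      let j : Int := n - 1 - p.1
      if j < (p.2.length : Int) ∧ PySem.List.pyGetD p.2 j "" = player then count + 1 else count) 0
  decide (count = 3)

-- ===== PRECONDITION & SPEC =====
def Spec_check_second_diag (board : List (List String)) (player : String) (out : Bool) : Prop := out = check_second_diag_alt board player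
instance (board : List (List String)) (player : String) (out : Bool) : Decidable (Spec_check_second_diag board player out) := by unfold Spec_check_second_diag; infer_instance

-- ===== CLAIM (what is proved, stated in full; the proofs are below) =====
def Claim_equal_check_second_diag : Prop := ∀ (board : List (List String)) (player : String), Dom_check_second_diag board player → Spec_check_second_diag board player (check_second_diag board player)

-- ===== LEMMAS AND PROOFS =====

-- countP of range(0, m) for a predicate pinned to the single index value t
lemma countP_pyRange_single (t : Int) (q : Int → Prop) [DecidablePred q] (m : Nat) :
    (PySem.List.pyRange 0 (m : Int) 1).countP (fun col => decide (t = col ∧ q col))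
      = if 0 ≤ t ∧ t < (m : Int) ∧ q t then 1 else 0 := by
  induction m with
  | zero =>
      rw [Nat.cast_zero, PySem.List.pyRange_one_eq_nil (le_refl 0), List.countP_nil, if_neg]
      omega
  | succ N ih =>
      have h : ((N + 1 : Nat) : Int) = (N : Int) + 1 := by push_cast; ring
      rw [h, PySem.List.pyRange_one_succ_right (by positivity : (0 : Int) ≤ (N : Int)),
        List.countP_append, ih, List.countP_cons, List.countP_nil]
      simp only [decide_eq_true_eq]
      by_cases ht : t = (N : Int)
      · subst ht
        by_cases hq : q ((N : Nat) : Int)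
        · simp [hq]
        · simp [hq]
      · have hne : ¬ (t = (N : Int) ∧ q ((N : Nat) : Int)) := fun hx => ht hx.1
        by_cases hq : q t
        · simp only [hne, hq, and_true, if_false]
          split_ifs with h1 h2 h2 <;> omega
        · simp only [hne, if_false]
          rw [if_neg (by tauto), if_neg (by tauto)]

-- ===== VERDICT (by name: the statement is the Claim_ definition above) =====
theorem check_second_diag_spec : Claim_equal_check_second_diag := by
  intro board player _
  unfold Spec_check_second_diag check_second_diag check_second_diag_alt
  dsimp only
  rw [PySem.List.enumerate_eq_map_pyRange board ([] : List String), PySem.List.len,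
    List.foldl_map]
  have hfold :
      (PySem.List.pyRange 0 (board.length : Int) 1).foldl (fun count row =>
        (PySem.List.pyRange 0 ((PySem.List.pyGetD board row []).length : Int) 1).foldl (fun count col =>
          if (board.length : Int) - row - 1 = col ∧
              PySem.List.pyGetD (PySem.List.pyGetD board row []) col "" = player
          then count + 1 else count) count) (0 : Int)
      = (PySem.List.pyRange 0 (board.length : Int) 1).foldl (fun count j =>
          if (board.length : Int) - 1 - j < ((PySem.List.pyGetD board j []).length : Int) ∧
              PySem.List.pyGetD (PySem.List.pyGetD board j []) ((board.length : Int) - 1 - j) "" = player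
          then count + 1 else count) (0 : Int) := by
    apply PySem.List.foldl_congr_mem
    intro acc row hrow
    rw [PySem.List.mem_pyRange_one] at hrow
    rw [PySem.List.foldl_ite_add_one]
    rw [countP_pyRange_single ((board.length : Int) - row - 1)
      (fun col => PySem.List.pyGetD (PySem.List.pyGetD board row []) col "" = player)]
    have hpos : (0 : Int) ≤ (board.length : Int) - row - 1 := by omega
    have heq : (board.length : Int) - row - 1 = (board.length : Int) - 1 - row := by ring
    rw [heq] at hpos ⊢
    split_ifs with h1 h2 h2 <;> simp_all
  rw [hfold]
  simp
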